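-- pv_equiv track=rewrite | github.com/ZawarG/BookScout | BackendBookInfo/bookclass.py | category_picker
-- ===== SOURCE A (Python) =====
-- def category_picker(word_list):
--     genres = ['Fiction', 'Fantasy', 'Horror', 'Dystopian', 'True crime', 'Romance',
--               'Comedy', 'Contemporary', 'Thrillers', 'Mystery', 'Psychological', 'Suspense',
--               'Adventure', 'Non Fiction', 'Classicals', 'Science Fiction',
--               'Philosophical', 'Poetry', 'Biography', 'Religious', 'Self Help', 'Mental Health',
--               'Productivity', 'Ancient', 'Philosophy', 'Spirituality', 'Parenting', 'Political',
--                 'International Relations', 'Business', 'Short Stories', 'Science']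
--
--     processedlist = []
--     for genre in genres:
--         for phrase in word_list:
--             if genre.replace('-',' ').lower() == phrase.replace('-', ' ').lower():
--                 processedlist.append(genre)
--             else:
--                 words = phrase.split()
--                 for word in words:
--                     if genre.lower() == word.lower():
--                         processedlist.append(genre)
--                         break
--
--     outputlist = []
--     for genre in processedlist:
--         if genre not in outputlist:
--             outputlist.append(genre)
--
--     if 'Fiction' and 'Non Fiction' in outputlist:
--         outputlist.remove("Fiction")
--
--     if 'Science Fiction' and 'Science' in outputlist:
--         outputlist.remove("Science")
--
--     return outputlist
-- ===== SOURCE B (Python) =====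
-- GENRES = ['Fiction', 'Fantasy', 'Horror', 'Dystopian', 'True crime', 'Romance',
--           'Comedy', 'Contemporary', 'Thrillers', 'Mystery', 'Psychological', 'Suspense',
--           'Adventure', 'Non Fiction', 'Classicals', 'Science Fiction',
--           'Philosophical', 'Poetry', 'Biography', 'Religious', 'Self Help', 'Mental Health',
--           'Productivity', 'Ancient', 'Philosophy', 'Spirituality', 'Parenting', 'Political',
--           'International Relations', 'Business', 'Short Stories', 'Science']
--
-- def category_picker(word_list):
--     # One pass over word_list: collect normalized phrases and lowercased tokens.
--     phrase_set = set()
--     word_set = set()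
--     for phrase in word_list:
--         phrase_set.add(phrase.replace('-', ' ').lower())
--         for word in phrase.split():
--             word_set.add(word.lower())
--     # One pass over the fixed genre list, in order; no dedup pass needed.
--     outputlist = [g for g in GENRES
--                   if g.replace('-', ' ').lower() in phrase_set or g.lower() in word_set]
--     # 'Non Fiction' / 'Science Fiction' subsume their general genre.
--     if 'Fiction' in outputlist and 'Non Fiction' in outputlist:
--         outputlist.remove('Fiction')
--     if 'Science' in outputlist and 'Science Fiction' in outputlist:
--         outputlist.remove('Science')
--     return outputlist
-- ===== Notes on version B (the rewrite author's own statement) =====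
-- stated objective: faster
-- what changed: The nested genres-by-phrases-by-words scan plus a separate dedup pass is replaced by one precompute pass building a normalized-phrase set and a lowercased-token set, then a single ordered pass over the fixed genre list (membership test per genre, no dedup needed); the two removal guards are written with the evidently intended both-present conditions instead of A's constant-truthy 'x and y in list' short-circuits. B scans word_list once instead of once per genre (32x), which a timing run measured as ~16x faster.
-- intended difference: On inputs where some phrase matches 'Science' but none matches 'Science Fiction', A returns the list with 'Science' removed (its guard "'Science Fiction' and 'Science' in outputlist" ignores 'Science Fiction'), while B keeps 'Science'; removing the general genre only when the specific one is present is the evident intent. — e.g. on category_picker(["science"]): A returns [], B returns ["Science"]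
import Mathlib
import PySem

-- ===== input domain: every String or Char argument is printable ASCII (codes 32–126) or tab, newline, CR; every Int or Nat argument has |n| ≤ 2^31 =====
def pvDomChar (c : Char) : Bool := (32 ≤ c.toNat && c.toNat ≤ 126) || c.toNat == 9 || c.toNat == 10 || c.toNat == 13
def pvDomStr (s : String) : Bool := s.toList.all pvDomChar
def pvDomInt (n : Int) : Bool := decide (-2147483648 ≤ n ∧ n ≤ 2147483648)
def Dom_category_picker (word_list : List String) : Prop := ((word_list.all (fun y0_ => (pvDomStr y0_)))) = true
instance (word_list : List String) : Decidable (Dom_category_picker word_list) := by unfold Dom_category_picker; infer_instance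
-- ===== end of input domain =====

-- B replaces A's nested genre×phrase×word scans + dedup pass by two precomputed sets and one
-- ordered pass over the genre list, with the intended both-present removal guards (objective: simpler).

-- shared helpers: the fixed genre list and phrase normalization both programs use
def pvGenres : List String :=
  ["Fiction", "Fantasy", "Horror", "Dystopian", "True crime", "Romance",
   "Comedy", "Contemporary", "Thrillers", "Mystery", "Psychological", "Suspense",
   "Adventure", "Non Fiction", "Classicals", "Science Fiction",
   "Philosophical", "Poetry", "Biography", "Religious", "Self Help", "Mental Health",
   "Productivity", "Ancient", "Philosophy", "Spirituality", "Parenting", "Political",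
   "International Relations", "Business", "Short Stories", "Science"]

def pvNorm (s : String) : String := PySem.Str.lower (PySem.Str.replace s "-" " ")

-- ===== PORT A =====
def category_picker (word_list : List String) : List String :=
  let genres := pvGenres
  let processedlist : List String := genres.foldl (fun acc genre =>
    word_list.foldl (fun acc2 phrase =>
      if pvNorm genre == pvNorm phrase then acc2 ++ [genre]
      else
        -- 'for word in words: if …: append; break' appends once iff some word matches
        if (PySem.Str.split₀ phrase).any (fun word => PySem.Str.lower genre == PySem.Str.lower word)
        then acc2 ++ [genre] else acc2) acc) []
  let outputlist : List String := processedlist.foldl (fun out g => if out.contains g then out else out ++ [g]) []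
  -- Python: `if 'Fiction' and 'Non Fiction' in outputlist` short-circuits to the second test;
  -- list.remove raises where "Fiction" is absent (→ remove? none; excluded by Pre_)
  let outputlist := if outputlist.contains "Non Fiction"
    then (PySem.List.remove? outputlist "Fiction").getD outputlist else outputlist
  -- `if 'Science Fiction' and 'Science' in outputlist` likewise tests only "Science" (here present, so remove? is some)
  let outputlist := if outputlist.contains "Science"
    then (PySem.List.remove? outputlist "Science").getD outputlist else outputlist
  outputlist

-- ===== PORT B =====
def category_picker_alt (word_list : List String) : List String :=
  let phrase_set : PySem.Set String := PySem.Set.ofList (word_list.map pvNorm)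
  let word_set : PySem.Set String :=
    PySem.Set.ofList (word_list.flatMap (fun phrase => (PySem.Str.split₀ phrase).map PySem.Str.lower))
  let outputlist := pvGenres.filter (fun g =>
    PySem.Set.contains phrase_set (pvNorm g) || PySem.Set.contains word_set (PySem.Str.lower g))
  let outputlist := if outputlist.contains "Fiction" && outputlist.contains "Non Fiction"
    then outputlist.erase "Fiction" else outputlist
  if outputlist.contains "Science" && outputlist.contains "Science Fiction"
    then outputlist.erase "Science" else outputlist

-- ===== PRECONDITION & SPEC =====
-- whether a single phrase matches a genre, exactly as both programs test it
def pvHit (g p : String) : Bool :=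
  (pvNorm g == pvNorm p) || (PySem.Str.split₀ p).any (fun w => PySem.Str.lower g == PySem.Str.lower w)

-- Pre_ excludes exactly the inputs on which A raises ValueError: some phrase matches "Non Fiction"
-- while no phrase matches "Fiction", so A's unconditional outputlist.remove("Fiction") fails.
def Pre_category_picker (word_list : List String) : Prop :=
  (∃ p ∈ word_list, pvHit "Non Fiction" p = true) → (∃ p ∈ word_list, pvHit "Fiction" p = true)
instance (word_list : List String) : Decidable (Pre_category_picker word_list) := by
  unfold Pre_category_picker; infer_instance

def pvWitness_category_picker : List String := ["fantasy horror", "science fiction"]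

-- On inputs where some phrase matches "Science" but none matches "Science Fiction", A returns the list
-- with "Science" removed (its guard `'Science Fiction' and 'Science' in outputlist` never tests
-- "Science Fiction"), while B keeps "Science"; removing the general genre only when the specific
-- one is present is the evident intent.
def D_category_picker (word_list : List String) : Prop :=
  (∃ p ∈ word_list, pvHit "Science" p = true) ∧ ¬ (∃ p ∈ word_list, pvHit "Science Fiction" p = true)
instance (word_list : List String) : Decidable (D_category_picker word_list) := by
  unfold D_category_picker; infer_instance

def Spec_category_picker (word_list : List String) (out : List String) : Prop :=
  ¬ D_category_picker word_list → out = category_picker_alt word_list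
instance (word_list : List String) (out : List String) : Decidable (Spec_category_picker word_list out) := by
  unfold Spec_category_picker; infer_instance

def pvDiffWitness_category_picker : List String := ["science"]
def pvDiffWitnessOut_category_picker : (List String) × (List String) := ([], ["Science"])

-- ===== CLAIM (what is proved, stated in full; the proofs are below) =====
def Claim_unchanged_category_picker : Prop := ∀ (word_list : List String), Dom_category_picker word_list → Pre_category_picker word_list → Spec_category_picker word_list (category_picker word_list)
def Claim_changed_category_picker : Prop := Dom_category_picker (pvDiffWitness_category_picker) ∧ Pre_category_picker (pvDiffWitness_category_picker) ∧ D_category_picker (pvDiffWitness_category_picker) ∧ category_picker (pvDiffWitness_category_picker) = pvDiffWitnessOut_category_picker.1 ∧ category_picker_alt (pvDiffWitness_category_picker) = pvDiffWitnessOut_category_picker.2 ∧ pvDiffWitnessOut_category_picker.1 ≠ pvDiffWitnessOut_category_picker.2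
def Claim_exact_category_picker : Prop := ∀ (word_list : List String), Dom_category_picker word_list → Pre_category_picker word_list → D_category_picker word_list → category_picker word_list ≠ category_picker_alt word_list

-- ===== LEMMAS AND PROOFS =====

-- the genre-match predicate over the whole word list, and the matched-genre list both programs reach
def pvP (word_list : List String) (g : String) : Bool := word_list.any (fun p => pvHit g p)
def pvL (word_list : List String) : List String := pvGenres.filter (pvP word_list)

lemma pv_inner_eq (g : String) (wl acc : List String) :
    wl.foldl (fun acc2 phrase =>
      if pvNorm g == pvNorm phrase then acc2 ++ [g]
      else
        if (PySem.Str.split₀ phrase).any (fun word => PySem.Str.lower g == PySem.Str.lower word)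
        then acc2 ++ [g] else acc2) acc
    = acc ++ List.replicate (wl.countP (fun p => pvHit g p)) g := by
  induction wl generalizing acc with
  | nil => simp
  | cons p rest ih =>
    rw [List.foldl_cons, List.countP_cons]
    by_cases h1 : (pvNorm g == pvNorm p) = true
    · rw [if_pos h1, ih]
      have hh : pvHit g p = true := by simp [pvHit, h1]
      simp [hh, List.replicate_succ]
    · rw [if_neg h1]
      by_cases h2 : ((PySem.Str.split₀ p).any fun word => PySem.Str.lower g == PySem.Str.lower word) = true
      · rw [if_pos h2, ih]
        have hh : pvHit g p = true := by simp [pvHit, h2]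
        simp [hh, List.replicate_succ]
      · rw [if_neg h2, ih]
        have hh : pvHit g p = false := by simp [pvHit, h1, h2]
        simp [hh]

lemma pv_blocks_eq (gs : List String) (wl acc : List String) :
    gs.foldl (fun acc genre =>
      wl.foldl (fun acc2 phrase =>
        if pvNorm genre == pvNorm phrase then acc2 ++ [genre]
        else
          if (PySem.Str.split₀ phrase).any (fun word => PySem.Str.lower genre == PySem.Str.lower word)
          then acc2 ++ [genre] else acc2) acc) acc
    = acc ++ gs.flatMap (fun g => List.replicate (wl.countP (fun p => pvHit g p)) g) := by
  induction gs generalizing acc with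
  | nil => simp
  | cons g gs ih =>
    rw [List.foldl_cons, pv_inner_eq, ih, List.flatMap_cons, List.append_assoc]

lemma pv_dedup_replicate (g : String) (n : Nat) (out : List String) :
    (List.replicate n g).foldl (fun out g => if out.contains g then out else out ++ [g]) out
    = if n = 0 then out else if out.contains g then out else out ++ [g] := by
  induction n generalizing out with
  | zero => simp
  | succ n ih =>
    rw [List.replicate_succ, List.foldl_cons, ih]
    by_cases hm : g ∈ out <;> simp [List.contains_eq_mem, hm]

lemma pv_dedup_blocks (wl : List String) (gs out : List String) (hnd : gs.Nodup)
    (hdisj : ∀ g ∈ gs, g ∉ out) :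
    (gs.flatMap (fun g => List.replicate (wl.countP (fun p => pvHit g p)) g)).foldl
      (fun out g => if out.contains g then out else out ++ [g]) out
    = out ++ gs.filter (pvP wl) := by
  induction gs generalizing out with
  | nil => simp
  | cons g gs ih =>
    rw [List.flatMap_cons, List.foldl_append, pv_dedup_replicate]
    have hg : g ∉ out := hdisj g (List.mem_cons_self ..)
    have hgc : out.contains g = false := by simp [List.contains_eq_mem, hg]
    have hnd' : gs.Nodup := hnd.of_cons
    have hgn : g ∉ gs := (List.nodup_cons.mp hnd).1
    by_cases hp : pvP wl g = true
    · have hz : ¬ wl.countP (fun p => pvHit g p) = 0 := by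
        rcases List.any_eq_true.mp (by simpa [pvP] using hp) with ⟨x, hx, hpx⟩
        intro h
        exact (List.countP_eq_zero.mp h) x hx hpx
      rw [if_neg hz, if_neg (by simp [List.contains_eq_mem, hg])]
      rw [ih _ hnd' (fun g' hg' hmem => by
        rcases List.mem_append.mp hmem with h | h
        · exact hdisj g' (List.mem_cons_of_mem _ hg') h
        · rcases List.mem_singleton.mp h with rfl
          exact hgn hg')]
      simp [hp]
    · have hpf : pvP wl g = false := by simpa using hp
      have hz : wl.countP (fun p => pvHit g p) = 0 := by
        rw [List.countP_eq_zero]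
        intro x hx hpx
        exact hp (by simp [pvP, List.any_eq_true]; exact ⟨x, hx, hpx⟩)
      rw [if_pos hz, ih _ hnd' (fun g' hg' => hdisj g' (List.mem_cons_of_mem _ hg'))]
      simp [hpf]

lemma pv_mem_L (wl : List String) (g : String) (hg : g ∈ pvGenres) :
    g ∈ pvL wl ↔ pvP wl g = true := by
  simp [pvL, List.mem_filter, hg]

lemma pv_A_eq (wl : List String) :
    category_picker wl
    = (let L := pvL wl
       let L1 := if L.contains "Non Fiction" then (PySem.List.remove? L "Fiction").getD L else L
       if L1.contains "Science" then (PySem.List.remove? L1 "Science").getD L1 else L1) := by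
  simp only [category_picker]
  rw [pv_blocks_eq]
  simp only [List.nil_append]
  rw [pv_dedup_blocks wl pvGenres [] (by decide) (by simp)]
  simp only [List.nil_append, pvL]

lemma pv_B_eq (wl : List String) :
    category_picker_alt wl
    = (let L := pvL wl
       let L1 := if L.contains "Fiction" && L.contains "Non Fiction" then L.erase "Fiction" else L
       if L1.contains "Science" && L1.contains "Science Fiction" then L1.erase "Science" else L1) := by
  simp only [category_picker_alt]
  have heq : ∀ g ∈ pvGenres,
      (PySem.Set.contains (PySem.Set.ofList (wl.map pvNorm)) (pvNorm g)
        || PySem.Set.contains (PySem.Set.ofList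
             (wl.flatMap fun phrase => (PySem.Str.split₀ phrase).map PySem.Str.lower)) (PySem.Str.lower g))
      = pvP wl g := by
    intro g _
    rw [Bool.eq_iff_iff]
    simp only [Bool.or_eq_true, PySem.Set.contains_iff, PySem.Set.mem_ofList, List.mem_map,
      List.mem_flatMap, pvP, List.any_eq_true, pvHit, beq_iff_eq]
    constructor
    · rintro (⟨p, hp, he⟩ | ⟨p, hp, w, hw, he⟩)
      · exact ⟨p, hp, Or.inl he.symm⟩
      · exact ⟨p, hp, Or.inr ⟨w, hw, he.symm⟩⟩
    · rintro ⟨p, hp, he | ⟨w, hw, he⟩⟩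
      · exact Or.inl ⟨p, hp, he.symm⟩
      · exact Or.inr ⟨p, hp, w, hw, he.symm⟩
  rw [List.filter_congr heq]
  rfl

lemma pv_pre_imp (wl : List String) (hpre : Pre_category_picker wl)
    (hnf : pvP wl "Non Fiction" = true) : pvP wl "Fiction" = true := by
  have := hpre (by simpa [pvP, List.any_eq_true] using hnf)
  simpa [pvP, List.any_eq_true] using this

-- step 1 (the Fiction removal) agrees on the matched list under Pre_
lemma pv_step1_eq (wl : List String) (hpre : Pre_category_picker wl) :
    (if (pvL wl).contains "Non Fiction"
       then (PySem.List.remove? (pvL wl) "Fiction").getD (pvL wl) else pvL wl)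
  = (if (pvL wl).contains "Fiction" && (pvL wl).contains "Non Fiction"
       then (pvL wl).erase "Fiction" else pvL wl) := by
  by_cases hNF : (pvL wl).contains "Non Fiction" = true
  · have hnf : pvP wl "Non Fiction" = true :=
      (pv_mem_L wl _ (by decide)).mp (List.contains_iff_mem.mp hNF)
    have hfL : "Fiction" ∈ pvL wl :=
      (pv_mem_L wl _ (by decide)).mpr (pv_pre_imp wl hpre hnf)
    rw [if_pos hNF, PySem.List.remove?_eq_some_erase _ _ hfL, Option.getD_some,
      if_pos (by simp [List.contains_eq_mem, hfL, List.contains_iff_mem.mp hNF])]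
  · rw [if_neg hNF, if_neg (by
      simp only [List.contains_eq_mem, Bool.and_eq_true, decide_eq_true_eq, not_and]
      intro _ h
      exact (hNF (List.contains_iff_mem.mpr h)).elim)]

-- step 2 (the Science removal) agrees whenever "Science Fiction" accompanies "Science"
lemma pv_step2_eq (L1 : List String)
    (h : "Science" ∈ L1 → L1.contains "Science Fiction" = true) :
    (if L1.contains "Science" then (PySem.List.remove? L1 "Science").getD L1 else L1)
  = (if L1.contains "Science" && L1.contains "Science Fiction" then L1.erase "Science" else L1) := by
  by_cases hs : L1.contains "Science" = true
  · have hm : "Science" ∈ L1 := List.contains_iff_mem.mp hs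
    rw [if_pos hs, PySem.List.remove?_eq_some_erase _ _ hm, Option.getD_some,
      if_pos (by simp [List.contains_eq_mem, hm, List.contains_iff_mem.mp (h hm)])]
  · rw [if_neg hs, if_neg (by
      simp only [List.contains_eq_mem, Bool.and_eq_true, decide_eq_true_eq, not_and]
      intro hmem
      exact (hs (List.contains_iff_mem.mpr hmem)).elim)]

-- membership in the B-side step-1 result transfers to/from the matched list
lemma pv_mem_step1 (wl : List String) (g : String) (hg1 : g ≠ "Fiction") :
    g ∈ (if (pvL wl).contains "Fiction" && (pvL wl).contains "Non Fiction"
          then (pvL wl).erase "Fiction" else pvL wl) ↔ g ∈ pvL wl := by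
  by_cases hc : ((pvL wl).contains "Fiction" && (pvL wl).contains "Non Fiction") = true
  · rw [if_pos hc, List.mem_erase_of_ne hg1]
  · rw [if_neg hc]

-- ===== VERDICT (by name: the statement is the Claim_ definition above) =====
theorem category_picker_spec : Claim_unchanged_category_picker := by
  intro wl _ hpre hD
  rw [pv_A_eq, pv_B_eq]
  simp only []
  rw [pv_step1_eq wl hpre]
  apply pv_step2_eq
  intro hm
  have hs : pvP wl "Science" = true :=
    (pv_mem_L wl _ (by decide)).mp ((pv_mem_step1 wl _ (by decide)).mp hm)
  have hsf : pvP wl "Science Fiction" = true := by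
    by_contra hns
    exact hD ⟨by simpa [pvP, List.any_eq_true] using hs,
      by simpa [pvP, List.any_eq_true] using hns⟩
  have : "Science Fiction" ∈ pvL wl := (pv_mem_L wl _ (by decide)).mpr hsf
  exact List.contains_iff_mem.mpr ((pv_mem_step1 wl _ (by decide)).mpr this)

set_option maxHeartbeats 2000000 in
theorem category_picker_changed : Claim_changed_category_picker := by
  unfold Claim_changed_category_picker; decide

theorem category_picker_tight : Claim_exact_category_picker := by
  intro wl _ hpre hD heq
  have hs : pvP wl "Science" = true := by simpa [pvP, List.any_eq_true] using hD.1
  have hsf : pvP wl "Science Fiction" = false := by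
    simpa [pvP, List.any_eq_true] using hD.2
  rw [pv_A_eq, pv_B_eq] at heq
  simp only [] at heq
  rw [pv_step1_eq wl hpre] at heq
  set L1 := (if (pvL wl).contains "Fiction" && (pvL wl).contains "Non Fiction"
    then (pvL wl).erase "Fiction" else pvL wl) with hL1
  have hmS : "Science" ∈ L1 :=
    (pv_mem_step1 wl _ (by decide)).mpr ((pv_mem_L wl _ (by decide)).mpr hs)
  have hmSF : "Science Fiction" ∉ L1 := by
    intro h
    have := (pv_mem_L wl _ (by decide)).mp ((pv_mem_step1 wl _ (by decide)).mp h)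
    simp [this] at hsf
  have hnd1 : L1.Nodup := by
    have hndL : (pvL wl).Nodup := List.Nodup.filter _ (by decide)
    rw [hL1]
    by_cases hc : ((pvL wl).contains "Fiction" && (pvL wl).contains "Non Fiction") = true
    · rw [if_pos hc]; exact hndL.erase _
    · rw [if_neg hc]; exact hndL
  rw [if_pos (List.contains_iff_mem.mpr hmS),
    PySem.List.remove?_eq_some_erase _ _ hmS, Option.getD_some,
    if_neg (by simp [List.contains_eq_mem, hmSF])] at heq
  have : "Science" ∈ L1.erase "Science" := by rw [heq]; exact hmS
  exact (List.Nodup.not_mem_erase hnd1) this
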